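-- pv_equiv track=rewrite | github.com/Connor22/hydrus | lib/Hydrus/Data.py | IntelligentMassIntersect
-- ===== SOURCE A (Python) =====
-- def IntelligentMassIntersect( sets_to_reduce ):
--
--     answer = None
--
--     def get_len( item ):
--
--         return len( item )
--
--
--     for set_to_reduce in sets_to_reduce:
--
--         if len( set_to_reduce ) == 0:
--
--             return set()
--
--
--         if answer is None:
--
--             answer = set( set_to_reduce )
--
--         else:
--
--             if len( answer ) == 0:
--
--                 return set()
--
--             else:
--
--                 answer.intersection_update( set_to_reduce )
--
--
--
--
--     if answer is None:
--
--         return set()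
--
--     else:
--
--         return answer
-- ===== SOURCE B (Python) =====
-- def IntelligentMassIntersect(sets_to_reduce):
--     sets_to_reduce = list(sets_to_reduce)
--     if not sets_to_reduce or any(not s for s in sets_to_reduce):
--         return set()
--     first, *rest = sets_to_reduce
--     return {x for x in first if all(x in s for s in rest)}
-- ===== Notes on version B (the rewrite author's own statement) =====
-- stated objective: simpler
-- what changed: Replaces the mutating loop with Optional sentinel, early returns and repeated intersection_update by a single guard (empty input or any empty set -> empty) plus one set comprehension filtering the first set by membership in all the others.
import Mathlib
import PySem

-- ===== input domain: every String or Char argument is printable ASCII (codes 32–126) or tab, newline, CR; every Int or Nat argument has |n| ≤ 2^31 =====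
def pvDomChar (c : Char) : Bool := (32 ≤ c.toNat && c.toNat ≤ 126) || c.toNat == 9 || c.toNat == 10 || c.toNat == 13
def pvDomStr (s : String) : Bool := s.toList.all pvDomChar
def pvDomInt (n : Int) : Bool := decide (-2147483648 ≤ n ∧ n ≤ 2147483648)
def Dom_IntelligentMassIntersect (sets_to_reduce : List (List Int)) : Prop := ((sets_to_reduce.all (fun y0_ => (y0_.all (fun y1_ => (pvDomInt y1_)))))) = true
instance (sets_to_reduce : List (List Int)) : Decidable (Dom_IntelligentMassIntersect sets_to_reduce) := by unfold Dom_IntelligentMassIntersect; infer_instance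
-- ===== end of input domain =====

-- B replaces A's mutating loop (None sentinel, early returns, intersection_update) by one
-- emptiness guard plus a single set comprehension over the first set; same value, not faster.

-- ===== PORT A =====
-- A's for-loop over sets_to_reduce with the Optional 'answer' accumulator, transcribed
-- as structural recursion; 'answer.intersection_update(s)' is PySem.Set.inter.
def pvLoopA : Option (PySem.Set Int) → List (List Int) → List Int
  | answer, [] =>
    match answer with
    | none => []
    | some a => a
  | answer, s :: rest =>
    if s.length = 0 then []
    else
      match answer with
      | none => pvLoopA (some (PySem.Set.ofList s)) rest
      | some a =>
        if a.length = 0 then []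
        else pvLoopA (some (PySem.Set.inter a s)) rest

def IntelligentMassIntersect (sets_to_reduce : List (List Int)) : List Int :=
  pvLoopA none sets_to_reduce

-- ===== PORT B =====
-- the guard 'not sets_to_reduce or any(not s ...)' then the set comprehension
-- '{x for x in first if all(x in s for s in rest)}' (a set built from a list → Set.ofList).
def IntelligentMassIntersect_alt (sets_to_reduce : List (List Int)) : List Int :=
  match sets_to_reduce with
  | [] => []
  | first :: rest =>
    if (first :: rest).any (fun s => s.isEmpty) then []
    else PySem.Set.ofList (first.filter (fun x => rest.all (fun s => PySem.Set.contains s x)))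

-- ===== PRECONDITION & SPEC =====
def Spec_IntelligentMassIntersect (sets_to_reduce : List (List Int)) (out : List Int) : Prop := out = IntelligentMassIntersect_alt sets_to_reduce
instance (sets_to_reduce : List (List Int)) (out : List Int) : Decidable (Spec_IntelligentMassIntersect sets_to_reduce out) := by unfold Spec_IntelligentMassIntersect; infer_instance

-- ===== CLAIM (what is proved, stated in full; the proofs are below) =====
def Claim_equal_IntelligentMassIntersect : Prop := ∀ (sets_to_reduce : List (List Int)), Dom_IntelligentMassIntersect sets_to_reduce → Spec_IntelligentMassIntersect sets_to_reduce (IntelligentMassIntersect sets_to_reduce)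

-- ===== LEMMAS AND PROOFS =====

-- A's loop, once the accumulator is set, is exactly a filter of it by membership in all remaining sets.
theorem pvLoopA_some (a : PySem.Set Int) (rest : List (List Int)) :
    pvLoopA (some a) rest
      = a.filter (fun x => rest.all (fun s => PySem.Set.contains s x)) := by
  induction rest generalizing a with
  | nil => simp [pvLoopA]
  | cons s rs ih =>
    by_cases hs : s.length = 0
    · have : s = [] := List.eq_nil_of_length_eq_zero hs
      subst this
      simp [pvLoopA, PySem.Set.contains]
    · by_cases ha : a.length = 0
      · have : a = [] := List.eq_nil_of_length_eq_zero ha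
        subst this
        simp [pvLoopA, hs]
      · simp only [pvLoopA, hs, ha, ite_false]
        rw [ih]
        simp [PySem.Set.inter, List.filter_filter, List.all_cons, Bool.and_comm]

-- set(xs filtered by p) = set(xs) filtered by p (Set.ofList keeps first occurrences).
theorem ofList_filter (p : Int → Bool) (xs : List Int) :
    PySem.Set.ofList (xs.filter p) = (PySem.Set.ofList xs).filter p := by
  induction xs with
  | nil => simp [PySem.Set.ofList_nil]
  | cons x xs ih =>
    by_cases hp : p x
    · simp [PySem.Set.ofList_cons, hp, ih, PySem.Set.discard, List.filter_filter,
        Bool.and_comm]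
    · simp only [List.filter_cons, hp, ite_false, Bool.false_eq_true, ih,
        PySem.Set.ofList_cons, List.filter_cons]
      simp only [PySem.Set.discard, List.filter_filter]
      apply List.filter_congr
      intro y _
      by_cases hyx : y = x
      · subst hyx; simp [hp]
      · simp [hyx]

-- ===== VERDICT (by name: the statement is the Claim_ definition above) =====
theorem IntelligentMassIntersect_spec : Claim_equal_IntelligentMassIntersect := by
  intro sets _
  unfold Spec_IntelligentMassIntersect IntelligentMassIntersect IntelligentMassIntersect_alt
  match sets with
  | [] => rfl
  | first :: rest =>
    by_cases hf : first.length = 0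
    · have : first = [] := List.eq_nil_of_length_eq_zero hf
      subst this
      simp [pvLoopA]
    · simp only [pvLoopA, hf, ite_false]
      rw [pvLoopA_some, ← ofList_filter]
      by_cases hany : (first :: rest).any (fun s => s.isEmpty)
      · -- some set is empty: every membership test on it fails, so the filter is empty too
        simp only [hany, if_true]
        obtain ⟨s, hs, hse⟩ := List.any_eq_true.mp hany
        have hsr : s ∈ rest := by
          rcases List.mem_cons.mp hs with h | h
          · exfalso; apply hf; rw [← h, List.isEmpty_iff.mp hse]; rfl
          · exact h
        have hnil : first.filter (fun x => rest.all (fun t => PySem.Set.contains t x)) = [] := by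
          apply List.filter_eq_nil_iff.mpr
          intro x _ hall
          have hc := List.all_eq_true.mp hall s hsr
          rw [List.isEmpty_iff.mp hse] at hc
          simp [PySem.Set.contains] at hc
        rw [hnil]
        rfl
      · simp [hany]
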